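-- pv_equiv track=rewrite | github.com/samueljeong/youtube-automation | tts/tts_chunking.py | estimate_chunk_stats
-- ===== SOURCE A (Python) =====
-- from typing import List, Dict
--
-- def estimate_chunk_stats(chunks: List[Dict]) -> Dict:
--     """청크 통계 정보 생성"""
--     if not chunks:
--         return {"total_chunks": 0, "total_bytes": 0, "avg_bytes": 0}
--
--     total_bytes = sum(c.get("byte_length", 0) for c in chunks)
--
--     return {
--         "total_chunks": len(chunks),
--         "total_bytes": total_bytes,
--         "avg_bytes": total_bytes // len(chunks) if chunks else 0,
--         "max_bytes": max(c.get("byte_length", 0) for c in chunks),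
--         "min_bytes": min(c.get("byte_length", 0) for c in chunks)
--     }
-- ===== SOURCE B (Python) =====
-- def estimate_chunk_stats(chunks):
--     """청크 통계 정보 생성 — single pass instead of four library scans."""
--     if not chunks:
--         return {"total_chunks": 0, "total_bytes": 0, "avg_bytes": 0}
--     first = chunks[0].get("byte_length", 0)
--     total, mx, mn = first, first, first
--     for c in chunks[1:]:
--         v = c.get("byte_length", 0)
--         total += v
--         if v > mx:
--             mx = v
--         if v < mn:
--             mn = v
--     return {
--         "total_chunks": len(chunks),
--         "total_bytes": total,
--         "avg_bytes": total // len(chunks),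
--         "max_bytes": mx,
--         "min_bytes": mn,
--     }
-- ===== Notes on version B (the rewrite author's own statement) =====
-- stated objective: alternative
-- what changed: Replaced the three separate generator scans (sum, max, min) by one explicit loop that maintains running total/max/min seeded from the first chunk.
import Mathlib
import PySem

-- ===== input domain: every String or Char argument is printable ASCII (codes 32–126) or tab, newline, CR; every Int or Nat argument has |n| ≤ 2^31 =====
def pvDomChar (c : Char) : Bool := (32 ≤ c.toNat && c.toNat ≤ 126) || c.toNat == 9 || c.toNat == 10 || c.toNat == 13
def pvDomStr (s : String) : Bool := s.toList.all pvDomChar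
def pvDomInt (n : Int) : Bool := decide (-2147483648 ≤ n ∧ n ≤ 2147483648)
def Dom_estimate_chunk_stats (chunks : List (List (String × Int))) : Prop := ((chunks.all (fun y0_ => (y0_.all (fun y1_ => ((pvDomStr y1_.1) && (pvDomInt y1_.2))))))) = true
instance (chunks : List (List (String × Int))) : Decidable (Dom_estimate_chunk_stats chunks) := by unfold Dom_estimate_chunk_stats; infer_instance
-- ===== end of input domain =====

-- B replaces A's three separate scans (sum / max / min generators) by one explicit
-- loop maintaining running total, max and min seeded from the first chunk (alternative decomposition).

-- ===== PORT A =====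
-- c.get("byte_length", 0)
def pvByteLen (c : List (String × Int)) : Int :=
  (PySem.Dict.mk c).getD "byte_length" 0

def estimate_chunk_stats (chunks : List (List (String × Int))) : List (String × Int) :=
  if chunks = [] then
    [("total_chunks", 0), ("total_bytes", 0), ("avg_bytes", 0)]
  else
    let total_bytes := (chunks.map pvByteLen).sum
    [("total_chunks", (chunks.length : Int)),
     ("total_bytes", total_bytes),
     ("avg_bytes", if chunks ≠ [] then PySem.Int.floordiv total_bytes chunks.length else 0),
     -- max/min over a nonempty generator; .getD 0 only totalizes the Option (never hit here)
     ("max_bytes", (PySem.List.max? (chunks.map pvByteLen) (fun x => x)).getD 0),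
     ("min_bytes", (PySem.List.min? (chunks.map pvByteLen) (fun x => x)).getD 0)]

-- ===== PORT B =====
def estimate_chunk_stats_alt (chunks : List (List (String × Int))) : List (String × Int) :=
  match chunks with
  | [] => [("total_chunks", 0), ("total_bytes", 0), ("avg_bytes", 0)]
  | c0 :: rest =>
    let first := pvByteLen c0
    let st := rest.foldl
      (fun (acc : Int × Int × Int) c =>
        let v := pvByteLen c
        (acc.1 + v,
         (if v > acc.2.1 then v else acc.2.1),
         (if v < acc.2.2 then v else acc.2.2)))
      (first, first, first)
    [("total_chunks", (chunks.length : Int)),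
     ("total_bytes", st.1),
     ("avg_bytes", PySem.Int.floordiv st.1 chunks.length),
     ("max_bytes", st.2.1),
     ("min_bytes", st.2.2)]

-- ===== PRECONDITION & SPEC =====
def Spec_estimate_chunk_stats (chunks : List (List (String × Int))) (out : List (String × Int)) : Prop := out = estimate_chunk_stats_alt chunks
instance (chunks : List (List (String × Int))) (out : List (String × Int)) : Decidable (Spec_estimate_chunk_stats chunks out) := by unfold Spec_estimate_chunk_stats; infer_instance

-- ===== CLAIM (what is proved, stated in full; the proofs are below) =====
def Claim_equal_estimate_chunk_stats : Prop := ∀ (chunks : List (List (String × Int))), Dom_estimate_chunk_stats chunks → Spec_estimate_chunk_stats chunks (estimate_chunk_stats chunks)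

-- ===== LEMMAS AND PROOFS =====

-- B's single triple-fold computes (total, running max, running min) componentwise.
theorem pvTripleFold (rest : List (List (String × Int))) (t mx mn : Int) :
    rest.foldl
      (fun (acc : Int × Int × Int) c =>
        let v := pvByteLen c
        (acc.1 + v,
         (if v > acc.2.1 then v else acc.2.1),
         (if v < acc.2.2 then v else acc.2.2)))
      (t, mx, mn)
    = (t + (rest.map pvByteLen).sum,
       (rest.map pvByteLen).foldl max mx,
       (rest.map pvByteLen).foldl min mn) := by
  induction rest generalizing t mx mn with
  | nil => simp
  | cons c cs ih =>
    simp only [List.foldl_cons, List.map_cons, List.sum_cons, List.foldl_cons, ih]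
    refine Prod.ext ?_ (Prod.ext ?_ ?_)
    · simp; ring
    · simp only; congr 1; simp [max_def]; omega
    · simp only; congr 1; simp [min_def]; omega

-- ===== VERDICT (by name: the statement is the Claim_ definition above) =====
theorem estimate_chunk_stats_spec : Claim_equal_estimate_chunk_stats := by
  intro chunks _
  unfold Spec_estimate_chunk_stats estimate_chunk_stats estimate_chunk_stats_alt
  cases chunks with
  | nil => simp
  | cons c0 rest =>
    simp only [List.map_cons, pvTripleFold, reduceCtorEq]
    simp [PySem.List.max?_id_cons, PySem.List.min?_id_cons]
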